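-- pv_equiv track=rewrite | github.com/HeadHunter483/msu-ling | Syntax/Ver 2.0/tmp/morphres.py | spro_morph
-- ===== SOURCE A (Python) =====
-- def spro_morph(string):
--     str5=""
--     word = string.split()
--     mas=[]
--     mas2=[]
--
--     for current_word in word:
--         mas.append(current_word.lower())
--
--     while(len(mas2)!=4):
--         mas2.append("-")
--
--     for s in mas:
--         if (s=='sg' or s=='pl'):
--             mas2[0]=s
--         if (s=='1p' or s=='2p' or s=='3p'):
--             mas2[1]=s
--         if (s=='f' or s=='m' or s=='n'):
--             mas2[2]=s
--         if (s=='nom' or s=='gen' or s=='dat' or s=='acc' or s=='ins' or s=='loc'):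
--             mas2[3]=s
--
--     i=0
--     for i in range(len(mas2)):
--         str5=str5+' '+mas2[i]
--
--
--     return str5
-- ===== SOURCE B (Python) =====
-- CATS = (("sg", "pl"),
--         ("1p", "2p", "3p"),
--         ("f", "m", "n"),
--         ("nom", "gen", "dat", "acc", "ins", "loc"))
--
--
-- def spro_morph(string):
--     words = [w.lower() for w in string.split()]
--     return ''.join(' ' + next((w for w in reversed(words) if w in cat), '-')
--                    for cat in CATS)
-- ===== Notes on version B (the rewrite author's own statement) =====
-- stated objective: simpler
-- what changed: Replaces A's forward overwriting pass over a mutable 4-slot list (plus the manual lower-casing and dash-filling loops) by four independent reverse searches, one per grammatical category, joined directly into the output string.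
import Mathlib
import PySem

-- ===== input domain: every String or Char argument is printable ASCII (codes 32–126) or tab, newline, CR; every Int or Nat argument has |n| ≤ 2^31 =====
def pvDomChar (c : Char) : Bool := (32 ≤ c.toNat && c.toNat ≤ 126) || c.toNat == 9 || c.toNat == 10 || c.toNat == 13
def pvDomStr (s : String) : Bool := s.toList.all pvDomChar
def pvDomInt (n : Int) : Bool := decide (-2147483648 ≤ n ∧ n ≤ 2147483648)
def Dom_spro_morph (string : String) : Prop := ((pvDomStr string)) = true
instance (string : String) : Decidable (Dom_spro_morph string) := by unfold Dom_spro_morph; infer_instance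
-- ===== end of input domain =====

-- B replaces A's overwriting forward pass over a mutable 4-slot list by four
-- independent reverse searches, one per category (objective: simpler).

-- ===== PORT A =====
-- the 'while len(mas2)!=4: mas2.append("-")' loop, with fuel (terminates within 5 steps)
def pvFillDash : Nat → List String → List String
  | 0, l => l
  | n + 1, l => if l.length ≠ 4 then pvFillDash n (l ++ ["-"]) else l

-- the body of A's classifying for-loop (mas2[i]=s via List.set)
def pvStepA (m : List String) (s : String) : List String :=
  let m := if s = "sg" ∨ s = "pl" then m.set 0 s else m
  let m := if s = "1p" ∨ s = "2p" ∨ s = "3p" then m.set 1 s else m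
  let m := if s = "f" ∨ s = "m" ∨ s = "n" then m.set 2 s else m
  if s = "nom" ∨ s = "gen" ∨ s = "dat" ∨ s = "acc" ∨ s = "ins" ∨ s = "loc" then m.set 3 s else m

def spro_morph (string : String) : String :=
  let str5 := ""
  let word := PySem.Str.split₀ string
  let mas : List String := word.foldl (fun acc w => acc ++ [PySem.Str.lower w]) []
  let mas2 : List String := pvFillDash 5 []
  let mas2 := mas.foldl pvStepA mas2
  (List.range mas2.length).foldl (fun acc i => acc ++ " " ++ mas2.getD i "") str5

-- ===== PORT B =====
def pvCats : List (List String) :=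
  [["sg", "pl"], ["1p", "2p", "3p"], ["f", "m", "n"],
   ["nom", "gen", "dat", "acc", "ins", "loc"]]

-- next((w for w in reversed(words) if w in cat), '-')
def pvPick (cat : List String) (ws : List String) : String :=
  (ws.reverse.find? (fun w => cat.contains w)).getD "-"

def spro_morph_alt (string : String) : String :=
  let words := (PySem.Str.split₀ string).map PySem.Str.lower
  PySem.Str.join "" (pvCats.map (fun cat => " " ++ pvPick cat words))

-- ===== PRECONDITION & SPEC =====
def Spec_spro_morph (string : String) (out : String) : Prop := out = spro_morph_alt string
instance (string : String) (out : String) : Decidable (Spec_spro_morph string out) := by unfold Spec_spro_morph; infer_instance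

-- ===== CLAIM (what is proved, stated in full; the proofs are below) =====
def Claim_equal_spro_morph : Prop := ∀ (string : String), Dom_spro_morph string → Spec_spro_morph string (spro_morph string)

-- ===== LEMMAS AND PROOFS =====

theorem pv_map_via_foldl (f : String → String) (l acc : List String) :
    l.foldl (fun a w => a ++ [f w]) acc = acc ++ l.map f := by
  induction l generalizing acc with
  | nil => simp
  | cons x xs ih => simp [List.foldl, ih]

-- reverse search on s::rest = reverse search on rest, with default updated by s
theorem pv_pickD_cons (cat : List String) (s : String) (rest : List String) (a : String) :
    (((s :: rest).reverse).find? (fun w => cat.contains w)).getD a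
      = ((rest.reverse).find? (fun w => cat.contains w)).getD
          (if cat.contains s then s else a) := by
  simp only [List.reverse_cons, List.find?_append]
  cases h : (rest.reverse).find? (fun w => cat.contains w) with
  | none => simp [List.find?]; split <;> simp_all
  | some w => simp

-- A's classifying fold over a 4-slot list, characterised slot-wise
theorem pv_core (ws : List String) (a b c d : String) :
    ws.foldl pvStepA [a, b, c, d] =
      [((ws.reverse).find? (fun w => (["sg","pl"] : List String).contains w)).getD a,
       ((ws.reverse).find? (fun w => (["1p","2p","3p"] : List String).contains w)).getD b,
       ((ws.reverse).find? (fun w => (["f","m","n"] : List String).contains w)).getD c,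
       ((ws.reverse).find? (fun w => (["nom","gen","dat","acc","ins","loc"] : List String).contains w)).getD d] := by
  induction ws generalizing a b c d with
  | nil => simp
  | cons s rest ih =>
    have hstep : pvStepA [a, b, c, d] s =
        [if (["sg","pl"] : List String).contains s then s else a,
         if (["1p","2p","3p"] : List String).contains s then s else b,
         if (["f","m","n"] : List String).contains s then s else c,
         if (["nom","gen","dat","acc","ins","loc"] : List String).contains s then s else d] := by
      simp only [pvStepA, List.contains_cons, List.contains_nil, Bool.or_false,
        Bool.or_eq_true, beq_iff_eq]
      split_ifs <;> simp [List.set]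
    rw [List.foldl_cons, hstep, ih,
        pv_pickD_cons, pv_pickD_cons, pv_pickD_cons, pv_pickD_cons]

-- ===== VERDICT (by name: the statement is the Claim_ definition above) =====
theorem spro_morph_spec : Claim_equal_spro_morph := by
  intro string _
  simp only [Spec_spro_morph, spro_morph, spro_morph_alt, pv_map_via_foldl,
    List.nil_append, show pvFillDash 5 [] = ["-", "-", "-", "-"] from rfl, pv_core]
  simp [pvCats, pvPick, PySem.Str.join, List.range_succ, String.append_assoc]
  have hsp : (" " : String).toList = [' '] := by decide
  rw [← String.toList_inj]
  simp [PySem.Chars.join, String.toList_append, String.toList_ofList, hsp,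
    List.intercalate, List.intersperse]
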